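-- pv_equiv track=rewrite | github.com/Selogaz/Obsidian-vault-cpp | skills/project/scripts/project.py | _set_longform_scenes
-- ===== SOURCE A (Python) =====
-- def _set_longform_scenes(fm: str, scenes: list[str]) -> str:
--     lines = fm.splitlines()
--     lf_idx = None
--     for i, line in enumerate(lines):
--         if line.strip() == "longform:":
--             lf_idx = i
--             break
--     if lf_idx is None:
--         return fm
--
--     block_end = len(lines)
--     for j in range(lf_idx + 1, len(lines)):
--         if lines[j] and not lines[j].startswith("  "):
--             block_end = j
--             break
--
--     scene_idx = None
--     for j in range(lf_idx + 1, block_end):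
--         if lines[j].startswith("  scenes:"):
--             scene_idx = j
--             break
--
--     scene_lines = ["  scenes:"] + [f"    - {s}" for s in scenes]
--
--     if scene_idx is None:
--         insert_at = block_end
--         lines = lines[:insert_at] + scene_lines + lines[insert_at:]
--         return "\n".join(lines)
--
--     scene_end = scene_idx + 1
--     while scene_end < block_end and lines[scene_end].startswith("    - "):
--         scene_end += 1
--
--     lines = lines[:scene_idx] + scene_lines + lines[scene_end:]
--     return "\n".join(lines)
-- ===== SOURCE B (Python) =====
-- def _set_longform_scenes(fm: str, scenes: list[str]) -> str:
--     lines = fm.splitlines()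
--     if not any(line.strip() == "longform:" for line in lines):
--         return fm
--     scene_lines = ["  scenes:"] + [f"    - {s}" for s in scenes]
--     out = []
--     in_block = False
--     done = False
--     skipping = False
--     for line in lines:
--         if skipping:
--             if line.startswith("    - "):
--                 continue
--             skipping = False
--         if in_block and not done:
--             if line.startswith("  scenes:"):
--                 out.extend(scene_lines)
--                 done = True
--                 skipping = True
--                 continue
--             if line and not line.startswith("  "):
--                 out.extend(scene_lines)
--                 done = True
--                 in_block = False
--         elif not in_block and not done and line.strip() == "longform:":
--             in_block = True
--         out.append(line)
--     if in_block and not done: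
--         out.extend(scene_lines)
--     return "\n".join(out)
-- ===== Notes on version B (the rewrite author's own statement) =====
-- stated objective: alternative
-- what changed: Replaced A's three separate index scans (block end, scenes line, dash run) plus list slicing by a single streaming pass over the lines that maintains in_block/done/skipping flags and emits the rebuilt scene block in place.
import Mathlib
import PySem

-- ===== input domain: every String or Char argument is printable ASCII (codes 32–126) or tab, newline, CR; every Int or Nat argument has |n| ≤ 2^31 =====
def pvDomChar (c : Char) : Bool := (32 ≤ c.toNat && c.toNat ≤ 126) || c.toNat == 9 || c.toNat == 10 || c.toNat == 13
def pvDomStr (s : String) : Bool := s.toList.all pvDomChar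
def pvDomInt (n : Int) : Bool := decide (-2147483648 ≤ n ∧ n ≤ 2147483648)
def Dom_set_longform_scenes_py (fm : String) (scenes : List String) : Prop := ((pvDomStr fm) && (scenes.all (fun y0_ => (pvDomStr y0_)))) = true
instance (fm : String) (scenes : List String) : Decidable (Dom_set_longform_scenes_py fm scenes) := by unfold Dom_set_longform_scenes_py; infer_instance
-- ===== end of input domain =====

-- B replaces A's three separate index scans plus list slicing by one streaming pass with flags; same O(n) cost, equal output.

-- ===== PORT A =====
-- `for j in range(lf_idx+1, len(lines)): … break` as index recursion
def pvBlockEndA (lines : List String) (j : Nat) : Nat :=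
  if j < lines.length then
    if lines.getD j "" != "" && !PySem.Str.startswith (lines.getD j "") "  " then j
    else pvBlockEndA lines (j+1)
  else lines.length
termination_by lines.length - j

-- `for j in range(lf_idx+1, block_end): … break`
def pvSceneIdxA (lines : List String) (j be : Nat) : Option Nat :=
  if j < be then
    if PySem.Str.startswith (lines.getD j "") "  scenes:" then some j
    else pvSceneIdxA lines (j+1) be
  else none
termination_by be - j

-- `while scene_end < block_end and lines[scene_end].startswith("    - "): scene_end += 1`
def pvSceneEndA (lines : List String) (k be : Nat) : Nat :=
  if k < be && PySem.Str.startswith (lines.getD k "") "    - " then pvSceneEndA lines (k+1) be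
  else k
termination_by be - k
decreasing_by
  rename_i hcond
  have : k < be := by simpa using (Bool.and_eq_true_iff.mp hcond).1
  omega

def set_longform_scenes_py (fm : String) (scenes : List String) : String :=
  let lines := PySem.Str.splitlines fm
  match lines.findIdx? (fun line => PySem.Str.strip line == "longform:") with
  | none => fm
  | some lf_idx =>
    let block_end := pvBlockEndA lines (lf_idx + 1)
    let scene_lines := "  scenes:" :: scenes.map (fun s => "    - " ++ s)
    match pvSceneIdxA lines (lf_idx + 1) block_end with
    | none =>
        PySem.Str.join "\n" (lines.take block_end ++ scene_lines ++ lines.drop block_end)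
    | some scene_idx =>
        let scene_end := pvSceneEndA lines (scene_idx + 1) block_end
        PySem.Str.join "\n" (lines.take scene_idx ++ scene_lines ++ lines.drop scene_end)

-- ===== PORT B =====
-- Source B's single for-loop over the lines with state (in_block, done, skipping); `continue` = plain recursive call
def pvBLoop (sl : List String) : List String → Bool → Bool → Bool → List String
  | [], inb, done, _skip => if inb && !done then sl else []
  | l :: rest, inb, done, skip =>
    if skip && PySem.Str.startswith l "    - " then
      pvBLoop sl rest inb done skip
    else
      if inb && !done then
        if PySem.Str.startswith l "  scenes:" then
          sl ++ pvBLoop sl rest inb true true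
        else if l != "" && !PySem.Str.startswith l "  " then
          sl ++ l :: pvBLoop sl rest false true false
        else
          l :: pvBLoop sl rest inb done false
      else if !inb && !done && (PySem.Str.strip l == "longform:") then
        l :: pvBLoop sl rest true done false
      else
        l :: pvBLoop sl rest inb done false

def set_longform_scenes_py_alt (fm : String) (scenes : List String) : String :=
  let lines := PySem.Str.splitlines fm
  if !(lines.any (fun line => PySem.Str.strip line == "longform:")) then fm
  else
    let scene_lines := "  scenes:" :: scenes.map (fun s => "    - " ++ s)
    PySem.Str.join "\n" (pvBLoop scene_lines lines false false false)

-- ===== PRECONDITION & SPEC =====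
def Spec_set_longform_scenes_py (fm : String) (scenes : List String) (out : String) : Prop := out = set_longform_scenes_py_alt fm scenes
instance (fm : String) (scenes : List String) (out : String) : Decidable (Spec_set_longform_scenes_py fm scenes out) := by unfold Spec_set_longform_scenes_py; infer_instance

-- ===== CLAIM (what is proved, stated in full; the proofs are below) =====
def Claim_equal_set_longform_scenes_py : Prop := ∀ (fm : String) (scenes : List String), Dom_set_longform_scenes_py fm scenes → Spec_set_longform_scenes_py fm scenes (set_longform_scenes_py fm scenes)

-- ===== LEMMAS AND PROOFS =====

def pLF (l : String) : Bool := PySem.Str.strip l == "longform:"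
def pScn (l : String) : Bool := PySem.Str.startswith l "  scenes:"
def pDash (l : String) : Bool := PySem.Str.startswith l "    - "
def pCont (l : String) : Bool := !(l != "" && !PySem.Str.startswith l "  ")

-- the common normal form of both programs' output line list
def specList (pre1 rest sl : List String) : List String :=
  let block := rest.takeWhile pCont
  let tail := rest.dropWhile pCont
  match block.findIdx? pScn with
  | none => pre1 ++ block ++ sl ++ tail
  | some k => pre1 ++ block.take k ++ sl ++ ((block.drop (k+1)).dropWhile pDash ++ tail)

theorem specList_append (pre1 rest sl : List String) :
    specList pre1 rest sl = pre1 ++ specList [] rest sl := by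
  cases hfi : (rest.takeWhile pCont).findIdx? pScn <;> simp [specList, hfi]

theorem prefix_pCont (l : String) (p : String) (hp : [' ', ' '] <+: p.toList)
    (h : PySem.Str.startswith l p = true) : pCont l = true := by
  simp only [PySem.Str.startswith_eq] at h
  rw [PySem.Chars.startswith_iff] at h
  have h2 : PySem.Chars.startswith l.toList [' ', ' '] = true := by
    rw [PySem.Chars.startswith_iff]; exact hp.trans h
  simp only [pCont, PySem.Str.startswith_eq]
  simp [h2]

theorem scn_pCont (l : String) (h : pScn l = true) : pCont l = true :=
  prefix_pCont l "  scenes:" (by decide) h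

theorem dash_pCont (l : String) (h : pDash l = true) : pCont l = true :=
  prefix_pCont l "    - " (by decide) h

theorem dropWhile_eq_drop {α : Type} (p : α → Bool) (l : List α) :
    l.dropWhile p = l.drop (l.takeWhile p).length := by
  induction l with
  | nil => rfl
  | cons a l ih => by_cases h : p a = true <;> simp [List.dropWhile_cons, List.takeWhile_cons, h, ih]

theorem dash_split (rest : List String) :
    rest.dropWhile pDash = (rest.takeWhile pCont).dropWhile pDash ++ rest.dropWhile pCont := by
  induction rest with
  | nil => rfl
  | cons l rest ih =>
    by_cases hd : pDash l = true
    · have hc : pCont l = true := dash_pCont l hd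
      simp [List.dropWhile_cons, List.takeWhile_cons, hd, hc, ih]
    · have hd' : pDash l = false := by simpa using hd
      by_cases hc : pCont l = true
      · simp [List.dropWhile_cons, List.takeWhile_cons, hd', hc,
          List.takeWhile_append_dropWhile]
      · have hc' : pCont l = false := by simpa using hc
        simp [List.dropWhile_cons, List.takeWhile_cons, hd', hc']

-- ===== A-side bridge lemmas =====

theorem pvBlockEndA_eq (lines : List String) (j : Nat) (h : j ≤ lines.length) :
    pvBlockEndA lines j = j + ((lines.drop j).takeWhile pCont).length := by
  fun_induction pvBlockEndA lines j with
  | case1 j hj hstop =>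
    rw [List.getD_eq_getElem lines "" hj] at hstop
    rw [← List.getElem_cons_drop hj, List.takeWhile_cons]
    simp at hstop
    have hc : pCont lines[j] = false := by simp [pCont, hstop]
    simp [hc]
  | case2 j hj hcont ih =>
    rw [List.getD_eq_getElem lines "" hj] at hcont
    rw [← List.getElem_cons_drop hj, List.takeWhile_cons]
    simp at hcont
    have hc : pCont lines[j] = true := by simp [pCont]; tauto
    rw [hc, if_pos rfl]
    rw [ih hj]
    simp [List.length_cons]
    omega
  | case3 j hj =>
    have hx : j = lines.length := le_antisymm h (Nat.le_of_not_lt hj)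
    simp [hx]

theorem pvSceneIdxA_eq (lines : List String) (j be : Nat) (h : j ≤ be) (hbe : be ≤ lines.length) :
    pvSceneIdxA lines j be =
      (((lines.drop j).take (be - j)).findIdx? pScn).map (fun k => j + k) := by
  fun_induction pvSceneIdxA lines j be with
  | case1 j hj hscn =>
    have hjl : j < lines.length := lt_of_lt_of_le hj hbe
    rw [List.getD_eq_getElem lines "" hjl] at hscn
    rw [← List.getElem_cons_drop hjl, show be - j = (be - (j+1)) + 1 by omega,
      List.take_succ_cons, List.findIdx?_cons]
    simp [show pScn lines[j] = true from hscn]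
  | case2 j hj hscn ih =>
    have hjl : j < lines.length := lt_of_lt_of_le hj hbe
    rw [List.getD_eq_getElem lines "" hjl] at hscn
    rw [← List.getElem_cons_drop hjl, show be - j = (be - (j+1)) + 1 by omega,
      List.take_succ_cons, List.findIdx?_cons]
    rw [ih (by omega)]
    have hscn' : pScn lines[j] = false := by simpa [pScn] using hscn
    rw [hscn']
    cases hfi : ((lines.drop (j+1)).take (be - (j+1))).findIdx? pScn <;>
      simp [hfi, Nat.add_comm, Nat.add_left_comm]
  | case3 j hj =>
    have : be - j = 0 := by omega
    simp [this]

theorem pvSceneEndA_eq (lines : List String) (k be : Nat) (h : k ≤ be) (hbe : be ≤ lines.length) :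
    pvSceneEndA lines k be = k + (((lines.drop k).take (be - k)).takeWhile pDash).length := by
  fun_induction pvSceneEndA lines k be with
  | case1 k hcond ih =>
    have hk : k < be := by simpa using (Bool.and_eq_true_iff.mp hcond).1
    have hkl : k < lines.length := lt_of_lt_of_le hk hbe
    have hd : pDash lines[k] = true := by
      have := (Bool.and_eq_true_iff.mp hcond).2
      rwa [List.getD_eq_getElem lines "" hkl] at this
    rw [← List.getElem_cons_drop hkl, show be - k = (be - (k+1)) + 1 by omega,
      List.take_succ_cons, List.takeWhile_cons, hd, if_pos rfl]
    rw [ih (by omega)]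
    simp
    omega
  | case2 k hcond =>
    by_cases hk : k < be
    · have hkl : k < lines.length := lt_of_lt_of_le hk hbe
      have hd : pDash lines[k] = false := by
        rcases Bool.and_eq_true_iff.not.mp hcond |> not_and_or.mp with h1 | h2
        · exact absurd (by simpa using hk) h1
        · rw [List.getD_eq_getElem lines "" hkl] at h2
          simpa [pDash] using h2
      rw [← List.getElem_cons_drop hkl, show be - k = (be - (k+1)) + 1 by omega,
        List.take_succ_cons, List.takeWhile_cons, hd]
      simp
    · have : be - k = 0 := by omega
      simp [this]

theorem A_char (fm : String) (scenes : List String) (i : Nat)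
    (hfi : (PySem.Str.splitlines fm).findIdx? (fun line => PySem.Str.strip line == "longform:") = some i) :
    set_longform_scenes_py fm scenes =
      PySem.Str.join "\n" (specList ((PySem.Str.splitlines fm).take (i+1))
        ((PySem.Str.splitlines fm).drop (i+1))
        ("  scenes:" :: scenes.map (fun s => "    - " ++ s))) := by
  simp only [set_longform_scenes_py, hfi]
  set lines := PySem.Str.splitlines fm with hlines
  set rest := lines.drop (i+1) with hrest
  set block := rest.takeWhile pCont with hblock
  set sl := "  scenes:" :: scenes.map (fun s => "    - " ++ s) with hsl
  have hlt : i < lines.length := by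
    rw [List.findIdx?_eq_some_iff_getElem] at hfi; exact hfi.1
  have hbl_le : block.length ≤ rest.length := (List.takeWhile_prefix pCont).length_le
  have hrl : rest.length = lines.length - (i+1) := by rw [hrest, List.length_drop]
  have hbe_le : (i+1) + block.length ≤ lines.length := by omega
  have htb : rest.take block.length = block :=
    (List.prefix_iff_eq_take.mp (List.takeWhile_prefix pCont)).symm
  have htail : rest.dropWhile pCont = rest.drop block.length := by
    rw [dropWhile_eq_drop, hblock]
  rw [pvBlockEndA_eq lines (i+1) (by omega), ← hrest, ← hblock]
  rw [pvSceneIdxA_eq lines (i+1) ((i+1) + block.length) (by omega) hbe_le, ← hrest]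
  rw [show (i+1) + block.length - (i+1) = block.length by omega, htb]
  cases hk : block.findIdx? pScn with
  | none =>
    simp only [Option.map_none]
    congr 1
    rw [List.take_add, ← hrest, htb]
    rw [show lines.drop ((i+1) + block.length) = rest.drop block.length from by
      rw [hrest, List.drop_drop]]
    rw [← htail]
    simp [specList, hk, ← hblock, List.append_assoc]
  | some k =>
    have hklt : k < block.length := by
      rw [List.findIdx?_eq_some_iff_getElem] at hk; exact hk.1
    simp only [Option.map_some]
    rw [pvSceneEndA_eq lines ((i+1) + k + 1) ((i+1) + block.length) (by omega) hbe_le]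
    have hstep1 : lines.drop ((i+1) + k + 1) = rest.drop (k+1) := by
      rw [hrest, List.drop_drop, show (i+1) + (k+1) = (i+1) + k + 1 from by omega]
    rw [hstep1, show (i+1) + block.length - ((i+1) + k + 1) = block.length - (k+1) by omega]
    have htake2 : (rest.drop (k+1)).take (block.length - (k+1)) = block.drop (k+1) := by
      conv_rhs => rw [← htb]
      rw [List.drop_take]
    rw [htake2]
    congr 1
    have htkA : lines.take ((i+1) + k) = lines.take (i+1) ++ block.take k := by
      rw [List.take_add, ← hrest]
      congr 1
      rw [← htb, List.take_take, min_eq_left (le_of_lt hklt)]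
    have hsplit : rest.drop (k+1) = block.drop (k+1) ++ rest.dropWhile pCont := by
      conv_lhs => rw [← List.takeWhile_append_dropWhile (p := pCont) (l := rest)]
      rw [List.drop_append, ← hblock, show k + 1 - block.length = 0 by omega, List.drop_zero]
    have hd_le : ((block.drop (k+1)).takeWhile pDash).length ≤ (block.drop (k+1)).length :=
      (List.takeWhile_prefix pDash).length_le
    have hdrA : lines.drop ((i+1) + k + 1 + ((block.drop (k+1)).takeWhile pDash).length) =
        (block.drop (k+1)).dropWhile pDash ++ rest.dropWhile pCont := by
      rw [show (i+1) + k + 1 + ((block.drop (k+1)).takeWhile pDash).length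
          = (i+1) + ((k + 1) + ((block.drop (k+1)).takeWhile pDash).length) by omega]
      rw [← List.drop_drop, ← hrest, ← List.drop_drop, hsplit]
      rw [List.drop_append, show ((block.drop (k+1)).takeWhile pDash).length - (block.drop (k+1)).length = 0 by omega,
        List.drop_zero]
      rw [← dropWhile_eq_drop]
    rw [htkA, hdrA]
    simp [specList, hk, ← hblock, List.append_assoc]

-- ===== B-side lemmas =====

theorem bloop_copy (sl : List String) (ls : List String) (inb : Bool) :
    pvBLoop sl ls inb true false = ls := by
  induction ls generalizing inb with
  | nil => simp [pvBLoop]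
  | cons l ls ih => simp [pvBLoop, ih]

theorem bloop_skip (sl : List String) (ls : List String) :
    pvBLoop sl ls true true true = ls.dropWhile pDash := by
  induction ls with
  | nil => simp [pvBLoop]
  | cons l ls ih =>
    by_cases hd : pDash l = true
    · have hd2 := hd; simp [pDash] at hd2
      simp [pvBLoop, hd2, ih, List.dropWhile_cons, hd]
    · have hd2 := hd; simp [pDash] at hd2
      have hd' : pDash l = false := by simpa using hd
      simp [pvBLoop, hd2, List.dropWhile_cons, hd', bloop_copy]

theorem bloop_block (sl : List String) (rest : List String) :
    pvBLoop sl rest true false false = specList [] rest sl := by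
  induction rest with
  | nil => simp [pvBLoop, specList]
  | cons l rest ih =>
    by_cases hs : pScn l = true
    · have hc : pCont l = true := scn_pCont l hs
      have hs2 := hs; simp [pScn] at hs2
      simp only [pvBLoop, Bool.false_and, Bool.true_and, Bool.not_false]
      simp only [specList, List.takeWhile_cons, hc, if_pos, List.dropWhile_cons,
        List.findIdx?_cons, hs]
      simp [hs2, bloop_skip, dash_split rest, specList]
    · have hs2 := hs; simp [pScn] at hs2
      by_cases hc : pCont l = true
      · have hc2 : ¬(¬l = "" ∧ PySem.Chars.startswith l.toList [' ', ' '] = false) := by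
          have h3 := hc; simp [pCont] at h3
          rcases h3 with h3 | h3
          · exact fun hx => hx.1 h3
          · exact fun hx => by rw [h3] at hx; exact absurd hx.2 (by simp)
        simp only [pvBLoop, Bool.false_and, Bool.true_and, Bool.not_false]
        simp [hs2, hc2, ih]
        simp only [specList, List.takeWhile_cons, hc, if_pos, List.dropWhile_cons,
          List.findIdx?_cons, hs]
        cases hfi : (rest.takeWhile pCont).findIdx? pScn <;> simp [hfi]
      · have hc2 : (¬l = "" ∧ PySem.Chars.startswith l.toList [' ', ' '] = false) := by
          have h3 := hc; simp [pCont] at h3; tauto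
        simp only [pvBLoop, Bool.false_and, Bool.true_and, Bool.not_false]
        simp [hs2, hc2, bloop_copy]
        have hc' : pCont l = false := by simpa using hc
        have hs' : pScn l = false := by simpa using hs
        simp [specList, List.takeWhile_cons, List.dropWhile_cons, hc', hs']

theorem bloop_pre (sl : List String) (pre rest : List String)
    (hpre : ∀ l ∈ pre, pLF l = false) :
    pvBLoop sl (pre ++ rest) false false false = pre ++ pvBLoop sl rest false false false := by
  induction pre with
  | nil => simp
  | cons l pre ih =>
    have hl : (PySem.Str.strip l == "longform:") = false := hpre l (by simp)
    simp [pvBLoop, hl, ih (fun x hx => hpre x (by simp [hx]))]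

theorem bloop_lf (sl : List String) (lf : String) (rest : List String) (hlf : pLF lf = true) :
    pvBLoop sl (lf :: rest) false false false = lf :: pvBLoop sl rest true false false := by
  have hl2 := hlf; simp [pLF] at hl2
  simp [pvBLoop, hl2]

theorem B_char (fm : String) (scenes : List String) (i : Nat)
    (hfi : (PySem.Str.splitlines fm).findIdx? (fun line => PySem.Str.strip line == "longform:") = some i) :
    set_longform_scenes_py_alt fm scenes =
      PySem.Str.join "\n" (specList ((PySem.Str.splitlines fm).take (i+1))
        ((PySem.Str.splitlines fm).drop (i+1))
        ("  scenes:" :: scenes.map (fun s => "    - " ++ s))) := by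
  simp only [set_longform_scenes_py_alt]
  set lines := PySem.Str.splitlines fm with hlines
  rw [List.findIdx?_eq_some_iff_getElem] at hfi
  obtain ⟨hlt, hp, hmin⟩ := hfi
  have hany : lines.any (fun line => PySem.Str.strip line == "longform:") = true :=
    List.any_eq_true.mpr ⟨lines[i], List.getElem_mem _, hp⟩
  rw [hany, if_neg (by simp)]
  refine congrArg (PySem.Str.join "\n") ?_
  have hpre : ∀ l ∈ lines.take i, pLF l = false := by
    intro x hx
    rw [List.mem_take_iff_getElem] at hx
    obtain ⟨j, hj, rfl⟩ := hx
    have := hmin j (by omega)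
    simpa [pLF] using this
  conv_lhs => rw [show lines = lines.take i ++ lines[i] :: lines.drop (i+1) from by
    rw [List.getElem_cons_drop hlt, List.take_append_drop]]
  rw [bloop_pre _ _ _ hpre, bloop_lf _ _ _ (show pLF lines[i] = true from hp), bloop_block]
  conv_rhs => rw [specList_append]
  rw [List.take_succ_eq_append_getElem hlt, List.append_assoc]
  simp

-- ===== VERDICT (by name: the statement is the Claim_ definition above) =====
theorem set_longform_scenes_py_spec : Claim_equal_set_longform_scenes_py := by
  intro fm scenes _
  unfold Spec_set_longform_scenes_py
  cases hfi : (PySem.Str.splitlines fm).findIdx? (fun line => PySem.Str.strip line == "longform:") with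
  | none =>
    have hany : (PySem.Str.splitlines fm).any (fun line => PySem.Str.strip line == "longform:") = false := by
      rw [List.any_eq_false]
      intro x hx
      have := List.findIdx?_eq_none_iff.mp hfi
      simpa using this x hx
    simp [set_longform_scenes_py, set_longform_scenes_py_alt, hfi, hany]
  | some i =>
    rw [A_char fm scenes i hfi, B_char fm scenes i hfi]
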